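-- pv_equiv track=rewrite | github.com/laneashipley-create/25-26-Tier-1-Soccer-Database | generate_report.py | date_bounds_from_rows
-- ===== SOURCE A (Python) =====
-- def date_bounds_from_rows(rows: list[dict]) -> tuple[str, str]:
--     """Earliest and latest match_date (YYYY-MM-DD) across own-goal rows; ("","") if none."""
--     dates: list[str] = []
--     for r in rows:
--         d = (r.get("match_date") or "")[:10]
--         if len(d) == 10 and d[4] == "-" and d[7] == "-":
--             dates.append(d)
--     if not dates:
--         return "", ""
--     return min(dates), max(dates)
-- ===== SOURCE B (Python) =====
-- def date_bounds_from_rows(rows: list[dict]) -> tuple[str, str]: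
--     """Earliest and latest match_date (YYYY-MM-DD) across own-goal rows; ("","") if none."""
--     lo = None
--     hi = None
--     for r in rows:
--         d = (r.get("match_date") or "")[:10]
--         if len(d) == 10 and d[4] == "-" and d[7] == "-":
--             if lo is None or d < lo:
--                 lo = d
--             if hi is None or hi < d:
--                 hi = d
--     return (lo if lo is not None else "", hi if hi is not None else "")
-- ===== Notes on version B (the rewrite author's own statement) =====
-- stated objective: alternative
-- what changed: Single pass maintaining running lo/hi Option accumulators instead of collecting all valid dates into a list and calling min/max on it.
import Mathlib
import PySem

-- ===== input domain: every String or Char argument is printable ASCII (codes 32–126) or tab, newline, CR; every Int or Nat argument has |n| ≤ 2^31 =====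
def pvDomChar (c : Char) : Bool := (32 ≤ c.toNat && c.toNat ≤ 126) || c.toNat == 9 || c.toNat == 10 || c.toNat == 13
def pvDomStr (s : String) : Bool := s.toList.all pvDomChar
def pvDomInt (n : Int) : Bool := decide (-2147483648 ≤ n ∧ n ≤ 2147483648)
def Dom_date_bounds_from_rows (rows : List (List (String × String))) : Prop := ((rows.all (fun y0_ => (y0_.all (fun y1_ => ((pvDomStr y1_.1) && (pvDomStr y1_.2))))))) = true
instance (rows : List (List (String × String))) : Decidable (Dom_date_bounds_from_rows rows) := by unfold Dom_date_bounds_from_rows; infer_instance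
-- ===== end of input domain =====

-- B replaces A's collect-then-min/max with a single pass over the rows keeping
-- running lo/hi Option accumulators (no intermediate list); same return value.

-- shared guard (identical in both Pythons): d = (r.get("match_date") or "")[:10]
def pvRowDate (r : List (String × String)) : String :=
  PySem.Str.slice (PySem.Dict.getD (PySem.Dict.mk r) "match_date" "") none (some 10)

-- len(d) == 10 and d[4] == "-" and d[7] == "-"
def pvValid (d : String) : Bool :=
  PySem.Str.len d == 10 && PySem.Str.pyGet? d 4 == some '-' && PySem.Str.pyGet? d 7 == some '-'

-- ===== PORT A =====
-- loop body of A: if valid, dates.append(d)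
def pvStepA (dates : List String) (r : List (String × String)) : List String :=
  let d := pvRowDate r
  if pvValid d then dates ++ [d] else dates

def date_bounds_from_rows (rows : List (List (String × String))) : String × String :=
  let dates := rows.foldl pvStepA []
  match dates with
  | [] => ("", "")
  | _ :: _ =>
      ((PySem.List.min? dates (fun x => x)).getD "",
       (PySem.List.max? dates (fun x => x)).getD "")

-- ===== PORT B =====
-- loop body of B: update the running lo/hi accumulators
def pvStepB (st : Option String × Option String) (r : List (String × String)) :
    Option String × Option String :=
  let d := pvRowDate r
  if pvValid d then
    ((match st.1 with
      | none => some d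
      | some lo => if d < lo then some d else some lo),
     (match st.2 with
      | none => some d
      | some hi => if hi < d then some d else some hi))
  else st

def date_bounds_from_rows_alt (rows : List (List (String × String))) : String × String :=
  let st := rows.foldl pvStepB (none, none)
  (st.1.getD "", st.2.getD "")

-- ===== PRECONDITION & SPEC =====
def Spec_date_bounds_from_rows (rows : List (List (String × String))) (out : String × String) : Prop := out = date_bounds_from_rows_alt rows
instance (rows : List (List (String × String))) (out : String × String) : Decidable (Spec_date_bounds_from_rows rows out) := by unfold Spec_date_bounds_from_rows; infer_instance

-- ===== CLAIM (what is proved, stated in full; the proofs are below) =====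
def Claim_equal_date_bounds_from_rows : Prop := ∀ (rows : List (List (String × String))), Dom_date_bounds_from_rows rows → Spec_date_bounds_from_rows rows (date_bounds_from_rows rows)

-- ===== LEMMAS AND PROOFS =====

theorem pv_min_append (acc : List String) (d : String) :
    PySem.List.min? (acc ++ [d]) (fun x => x) =
      some (match PySem.List.min? acc (fun x => x) with
            | none => d
            | some lo => if d < lo then d else lo) := by
  cases acc with
  | nil => rfl
  | cons x t =>
      rw [List.cons_append, PySem.List.min?_id_cons, PySem.List.min?_id_cons,
        List.foldl_append]
      simp only [List.foldl_cons, List.foldl_nil, Option.some.injEq]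
      rcases lt_or_ge d (t.foldl min x) with h | h
      · rw [if_pos h, min_eq_right (le_of_lt h)]
      · rw [if_neg (not_lt.mpr h), min_eq_left h]

theorem pv_max_append (acc : List String) (d : String) :
    PySem.List.max? (acc ++ [d]) (fun x => x) =
      some (match PySem.List.max? acc (fun x => x) with
            | none => d
            | some hi => if hi < d then d else hi) := by
  cases acc with
  | nil => rfl
  | cons x t =>
      rw [List.cons_append, PySem.List.max?_id_cons, PySem.List.max?_id_cons,
        List.foldl_append]
      simp only [List.foldl_cons, List.foldl_nil, Option.some.injEq]
      rcases lt_or_ge (t.foldl max x) d with h | h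
      · rw [if_pos h, max_eq_right (le_of_lt h)]
      · rw [if_neg (not_lt.mpr h), max_eq_left h]

theorem pv_stepB_eq (acc : List String) (r : List (String × String)) :
    pvStepB (PySem.List.min? acc (fun x => x), PySem.List.max? acc (fun x => x)) r =
      (PySem.List.min? (pvStepA acc r) (fun x => x),
       PySem.List.max? (pvStepA acc r) (fun x => x)) := by
  unfold pvStepA pvStepB
  by_cases h : pvValid (pvRowDate r)
  · simp only [h, if_pos]
    rw [pv_min_append, pv_max_append]
    cases PySem.List.min? acc (fun x => x) <;>
      cases PySem.List.max? acc (fun x => x) <;>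
        simp [apply_ite some]
  · simp [h]

theorem pv_inv (rows : List (List (String × String))) : ∀ acc : List String,
    rows.foldl pvStepB (PySem.List.min? acc (fun x => x), PySem.List.max? acc (fun x => x)) =
      (PySem.List.min? (rows.foldl pvStepA acc) (fun x => x),
       PySem.List.max? (rows.foldl pvStepA acc) (fun x => x)) := by
  induction rows with
  | nil => intro acc; rfl
  | cons r rows ih =>
      intro acc
      rw [List.foldl_cons, List.foldl_cons, pv_stepB_eq, ih]

-- ===== VERDICT (by name: the statement is the Claim_ definition above) =====
theorem date_bounds_from_rows_spec : Claim_equal_date_bounds_from_rows := by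
  intro rows _
  unfold Spec_date_bounds_from_rows date_bounds_from_rows date_bounds_from_rows_alt
  have h := pv_inv rows []
  simp only [PySem.List.min?, PySem.List.max?] at h
  rw [show ((none, none) : Option String × Option String) =
      (PySem.List.min? ([] : List String) (fun x => x),
       PySem.List.max? ([] : List String) (fun x => x)) from rfl,
    pv_inv rows []]
  cases hd : rows.foldl pvStepA [] with
  | nil => simp [PySem.List.min?, PySem.List.max?]
  | cons x t => simp
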